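-- pv_equiv track=rewrite | github.com/MrAyush/DataMining | Assignment3/q7.py | split_data_equal_width
-- ===== SOURCE A (Python) =====
-- def split_data_equal_width(data_set_raw):
--     split_data = []
--     w = (max(data_set_raw) - min(data_set_raw)) // 3
--     i = 1
--     a = min(data_set_raw)
--     interval = min(data_set_raw) + i * w
--     for _ in range(1, 4):
--         split_data.append([x for x in data_set_raw if a < x <= interval])
--         a = interval
--         i = i + 1
--         interval = min(data_set_raw) + (i * w)
--     return split_data
-- ===== SOURCE B (Python) =====
-- def split_data_equal_width(data_set_raw):
--     lo = min(data_set_raw)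
--     hi = max(data_set_raw)
--     w = (hi - lo) // 3
--     bins = [[], [], []]
--     for x in data_set_raw:
--         if x <= lo or w == 0:
--             continue
--         k = (x - lo - 1) // w
--         if k <= 2:
--             bins[k].append(x)
--     return bins
-- ===== Notes on version B (the rewrite author's own statement) =====
-- stated objective: alternative
-- what changed: A makes three separate whole-list comprehension passes with running interval bounds; B makes a single pass over the data, computing each element's bin index k = (x-lo-1)//w from exact integer boundaries and appending to bins[k].
import Mathlib
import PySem

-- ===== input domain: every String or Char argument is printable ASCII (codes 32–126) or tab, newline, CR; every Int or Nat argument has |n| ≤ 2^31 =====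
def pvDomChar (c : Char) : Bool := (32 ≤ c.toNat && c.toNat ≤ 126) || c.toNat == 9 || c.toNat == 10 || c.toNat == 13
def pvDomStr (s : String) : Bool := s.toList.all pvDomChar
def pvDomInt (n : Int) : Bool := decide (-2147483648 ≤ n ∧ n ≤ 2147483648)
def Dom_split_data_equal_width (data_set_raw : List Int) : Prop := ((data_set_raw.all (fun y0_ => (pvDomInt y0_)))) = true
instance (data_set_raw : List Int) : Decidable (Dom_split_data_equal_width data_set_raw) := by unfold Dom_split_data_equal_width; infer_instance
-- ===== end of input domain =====

-- B replaces A's three whole-list comprehension passes by one pass that computes each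
-- element's bin index k from exact integer boundaries (objective: alternative decomposition).

-- ===== PORT A =====
def split_data_equal_width (data_set_raw : List Int) : List (List Int) :=
  let w := PySem.Int.floordiv
    (((PySem.List.max? data_set_raw (fun x => x)).getD 0) -
     ((PySem.List.min? data_set_raw (fun x => x)).getD 0)) 3
  let i : Int := 1
  let a := (PySem.List.min? data_set_raw (fun x => x)).getD 0
  let interval := (PySem.List.min? data_set_raw (fun x => x)).getD 0 + i * w
  let st := (PySem.List.pyRange 1 4 1).foldl
    (fun (st : List (List Int) × Int × Int × Int) _ =>
      match st with
      | (split_data, a, i, interval) =>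
        let split_data := split_data ++ [data_set_raw.filter (fun x => decide (a < x ∧ x ≤ interval))]
        let a := interval
        let i := i + 1
        let interval := (PySem.List.min? data_set_raw (fun x => x)).getD 0 + i * w
        (split_data, a, i, interval))
    ([], a, i, interval)
  st.1

-- ===== PORT B =====
def split_data_equal_width_alt (data_set_raw : List Int) : List (List Int) :=
  let lo := (PySem.List.min? data_set_raw (fun x => x)).getD 0
  let hi := (PySem.List.max? data_set_raw (fun x => x)).getD 0
  let w := PySem.Int.floordiv (hi - lo) 3
  data_set_raw.foldl
    (fun (bins : List (List Int)) x =>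
      if x ≤ lo ∨ w = 0 then bins
      else
        let k := PySem.Int.floordiv (x - lo - 1) w
        if k ≤ 2 then bins.modify k.toNat (· ++ [x]) else bins)
    [[], [], []]

-- ===== PRECONDITION & SPEC =====
-- Pre_ excludes only the empty list, on which Python's max()/min() raise ValueError (in A and in B alike).
def Pre_split_data_equal_width (data_set_raw : List Int) : Prop := data_set_raw ≠ []
instance (data_set_raw : List Int) : Decidable (Pre_split_data_equal_width data_set_raw) := by unfold Pre_split_data_equal_width; infer_instance
def pvWitness_split_data_equal_width : List Int := [1, 2, 5, 9, 4, 7]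

def Spec_split_data_equal_width (data_set_raw : List Int) (out : List (List Int)) : Prop := out = split_data_equal_width_alt data_set_raw
instance (data_set_raw : List Int) (out : List (List Int)) : Decidable (Spec_split_data_equal_width data_set_raw out) := by unfold Spec_split_data_equal_width; infer_instance

-- ===== CLAIM (what is proved, stated in full; the proofs are below) =====
def Claim_equal_split_data_equal_width : Prop := ∀ (data_set_raw : List Int), Dom_split_data_equal_width data_set_raw → Pre_split_data_equal_width data_set_raw → Spec_split_data_equal_width data_set_raw (split_data_equal_width data_set_raw)

-- ===== LEMMAS AND PROOFS =====

-- B's one-pass fold, characterized: it produces the three boundary filters.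
theorem foldB_char (lo w : Int) (hw : 0 ≤ w) (l : List Int) :
    ∀ (b0 b1 b2 : List Int),
    l.foldl
      (fun (bins : List (List Int)) x =>
        if x ≤ lo ∨ w = 0 then bins
        else
          let k := PySem.Int.floordiv (x - lo - 1) w
          if k ≤ 2 then bins.modify k.toNat (· ++ [x]) else bins)
      [b0, b1, b2] =
    [b0 ++ l.filter (fun x => decide (lo < x ∧ x ≤ lo + w)),
     b1 ++ l.filter (fun x => decide (lo + w < x ∧ x ≤ lo + 2 * w)),
     b2 ++ l.filter (fun x => decide (lo + 2 * w < x ∧ x ≤ lo + 3 * w))] := by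
  induction l with
  | nil => intro b0 b1 b2; simp
  | cons x t ih =>
    intro b0 b1 b2
    by_cases hskip : x ≤ lo ∨ w = 0
    · simp [List.foldl_cons, List.filter_cons, hskip, ih]; omega
    · rw [not_or] at hskip
      obtain ⟨hx, hw0⟩ := hskip
      rw [Int.not_le] at hx
      have hwpos : 0 < w := lt_of_le_of_ne hw (Ne.symm hw0)
      have hif : ¬ (x ≤ lo ∨ w = 0) := by omega
      have hbr := (PySem.Int.floordiv_eq_iff_of_pos (a := x - lo - 1)
        (b := w) (q := PySem.Int.floordiv (x - lo - 1) w) hwpos).mp rfl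
      have hk0 : 0 ≤ PySem.Int.floordiv (x - lo - 1) w := by
        rw [PySem.Int.le_floordiv_iff_mul_le hwpos]; omega
      have hkc : PySem.Int.floordiv (x - lo - 1) w = 0 ∨
          PySem.Int.floordiv (x - lo - 1) w = 1 ∨
          PySem.Int.floordiv (x - lo - 1) w = 2 ∨
          3 ≤ PySem.Int.floordiv (x - lo - 1) w := by omega
      rcases hkc with h | h | h | h
      · rw [h] at hbr; norm_num at hbr
        simp [List.foldl_cons, List.filter_cons, hif, h, ih]; omega
      · rw [h] at hbr; norm_num at hbr
        simp [List.foldl_cons, List.filter_cons, hif, h, ih]; omega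
      · rw [h] at hbr; norm_num at hbr
        simp [List.foldl_cons, List.filter_cons, hif, h, ih]; omega
      · have h3 : 3 * w ≤ x - lo - 1 := le_trans (by nlinarith) hbr.1
        have hk3 : ¬ PySem.Int.floordiv (x - lo - 1) w ≤ 2 := by omega
        simp [List.foldl_cons, List.filter_cons, hif, hk3, ih]; omega

-- ===== VERDICT (by name: the statement is the Claim_ definition above) =====
theorem split_data_equal_width_spec : Claim_equal_split_data_equal_width := by
  intro d _ hpre
  unfold Spec_split_data_equal_width split_data_equal_width split_data_equal_width_alt
  obtain ⟨m, hm⟩ : ∃ m, PySem.List.min? d (fun x => x) = some m := by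
    cases h : PySem.List.min? d (fun x => x) with
    | none => exact absurd ((PySem.List.min?_eq_none_iff d (fun x => x)).mp h) hpre
    | some m => exact ⟨m, rfl⟩
  obtain ⟨M, hM⟩ : ∃ M, PySem.List.max? d (fun x => x) = some M := by
    cases h : PySem.List.max? d (fun x => x) with
    | none => exact absurd ((PySem.List.max?_eq_none_iff d (fun x => x)).mp h) hpre
    | some M => exact ⟨M, rfl⟩
  have hmM : m ≤ M := PySem.List.min?_isMin hm M (PySem.List.max?_mem hM)
  have hw : 0 ≤ PySem.Int.floordiv (M - m) 3 := by
    rw [PySem.Int.floordiv_eq_ediv_of_pos (by norm_num)]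
    exact Int.ediv_nonneg (by omega) (by norm_num)
  have hrange : PySem.List.pyRange 1 4 1 = [1, 2, 3] := by decide
  simp only [hm, hM, Option.getD_some, hrange, List.foldl_cons, List.foldl_nil]
  rw [foldB_char m (PySem.Int.floordiv (M - m) 3) hw d [] [] []]
  norm_num
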